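-- pv_equiv track=rewrite | github.com/BlueCitizens/bilibili-app-cache-converter | src/flask/scripts/bili.py | validPathName
-- ===== SOURCE A (Python) =====
-- def validPathName(name:str):
--     # 非法字符 '[:*?"<>|]'
--     result = name.replace("[","")
--     result = result.replace(":","")
--     result = result.replace("*","")
--     result = result.replace("?","")
--     result = result.replace("\"","")
--     result = result.replace("<","")
--     result = result.replace(">","")
--     result = result.replace("|","")
--     result = result.replace("]","")
--     # 最后不能以.结尾
--     while result.endswith("."):
--         result = result[:-1]
--     # result = result.replace("！","")
--     return result
-- ===== SOURCE B (Python) =====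
-- _ILLEGAL = set('[:*?"<>|]')
--
-- def validPathName(name: str):
--     # single filtering pass, then one library strip of trailing dots
--     return ''.join(c for c in name if c not in _ILLEGAL).rstrip('.')
-- ===== Notes on version B (the rewrite author's own statement) =====
-- stated objective: simpler
-- what changed: Replaces nine sequential .replace scans with one filtering pass over the characters and the trailing-dot while-loop with a single rstrip('.').
import Mathlib
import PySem

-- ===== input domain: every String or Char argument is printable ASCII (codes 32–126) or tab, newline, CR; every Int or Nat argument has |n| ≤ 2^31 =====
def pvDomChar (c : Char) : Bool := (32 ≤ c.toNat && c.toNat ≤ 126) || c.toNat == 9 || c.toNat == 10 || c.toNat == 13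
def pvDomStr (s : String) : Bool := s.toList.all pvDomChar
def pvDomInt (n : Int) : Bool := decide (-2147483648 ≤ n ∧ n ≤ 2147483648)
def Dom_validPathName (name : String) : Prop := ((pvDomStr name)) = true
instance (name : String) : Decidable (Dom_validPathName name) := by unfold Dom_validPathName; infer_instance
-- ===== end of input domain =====

-- B replaces A's nine sequential .replace scans by one filtering pass and the
-- while-loop by a single rstrip('.'); objective: simpler.

-- ===== PORT A =====
-- while result.endswith("."): result = result[:-1]
def stripTrailingDotsA (s : String) : String :=
  if PySem.Str.endswith s "." then stripTrailingDotsA (PySem.Str.slice s none (some (-1))) else s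
termination_by s.toList.length
decreasing_by
  rename_i h
  rw [PySem.Str.endswith_eq, PySem.Chars.endswith_iff] at h
  have hne : s.toList ≠ [] := by
    intro hnil; rw [hnil] at h; exact absurd (List.suffix_nil.mp h) (by simp)
  have hp : 0 < s.toList.length := List.length_pos_of_ne_nil hne
  rw [PySem.Str.slice_to_neg_one]
  simp only [List.length_dropLast]
  omega

def validPathName (name : String) : String :=
  let result := PySem.Str.replace name "[" ""
  let result := PySem.Str.replace result ":" ""
  let result := PySem.Str.replace result "*" ""
  let result := PySem.Str.replace result "?" ""
  let result := PySem.Str.replace result "\"" ""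
  let result := PySem.Str.replace result "<" ""
  let result := PySem.Str.replace result ">" ""
  let result := PySem.Str.replace result "|" ""
  let result := PySem.Str.replace result "]" ""
  stripTrailingDotsA result

-- ===== PORT B =====
def pvIllegal : List Char := ['[', ':', '*', '?', '"', '<', '>', '|', ']']

-- ''.join(c for c in name if c not in _ILLEGAL).rstrip('.')
-- rstrip('.') (rstrip with a chars argument) is ported by hand — drop trailing
-- characters of the set {'.'} — which is exactly Python's str.rstrip(chars).
def validPathName_alt (name : String) : String :=
  let kept := name.toList.filter (fun c => !(pvIllegal.contains c))
  String.ofList ((kept.reverse.dropWhile (fun c => ['.'].contains c)).reverse)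

-- ===== PRECONDITION & SPEC =====
def Spec_validPathName (name : String) (out : String) : Prop := out = validPathName_alt name
instance (name : String) (out : String) : Decidable (Spec_validPathName name out) := by unfold Spec_validPathName; infer_instance

-- ===== CLAIM (what is proved, stated in full; the proofs are below) =====
def Claim_equal_validPathName : Prop := ∀ (name : String), Dom_validPathName name → Spec_validPathName name (validPathName name)

-- ===== LEMMAS AND PROOFS =====

-- replace.go with a single-char pattern and empty replacement is a filter
lemma replace_go_single (c : Char) (fuel : Nat) :
    ∀ (l acc : List Char), l.length ≤ fuel →
      PySem.Chars.replace.go [c] [] fuel l acc = acc.reverse ++ l.filter (fun x => !(x == c)) := by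
  induction fuel with
  | zero =>
    intro l acc h
    have : l = [] := List.length_eq_zero_iff.mp (Nat.le_zero.mp h)
    subst this; simp [PySem.Chars.replace.go]
  | succ n ih =>
    intro l acc h
    cases l with
    | nil => simp [PySem.Chars.replace.go]
    | cons x t =>
      simp only [PySem.Chars.replace.go]
      by_cases hx : x = c
      · subst hx
        have hp : List.isPrefixOf [x] (x :: t) = true := by simp [List.isPrefixOf]
        rw [hp, if_pos rfl]
        simp only [List.length_cons, List.length_nil, List.drop_succ_cons, List.drop_zero,
          List.reverse_nil, List.nil_append]
        rw [ih t acc (by simpa using Nat.le_of_succ_le_succ h)]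
        simp
      · have hp : List.isPrefixOf [c] (x :: t) = false := by
          simp [List.isPrefixOf]; exact fun hh => hx hh.symm
        rw [hp]
        simp only [Bool.false_eq_true, if_false]
        rw [ih t (x :: acc) (by simpa using Nat.le_of_succ_le_succ h)]
        simp [hx]

lemma replace_single (cs : List Char) (c : Char) :
    PySem.Chars.replace cs [c] [] = cs.filter (fun x => !(x == c)) := by
  simp only [PySem.Chars.replace, List.isEmpty]
  rw [replace_go_single c cs.length cs [] le_rfl]
  simp

-- the nine removals amount to one filter by the illegal-set complement
lemma nine_filters (cs : List Char) :
    ((((((((cs.filter (fun x => !(x == '['))).filter (fun x => !(x == ':'))).filter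
      (fun x => !(x == '*'))).filter (fun x => !(x == '?'))).filter
      (fun x => !(x == '"'))).filter (fun x => !(x == '<'))).filter
      (fun x => !(x == '>'))).filter (fun x => !(x == '|'))).filter (fun x => !(x == ']'))
    = cs.filter (fun c => !(pvIllegal.contains c)) := by
  simp only [List.filter_filter]
  apply List.filter_congr
  intro c _
  simp only [pvIllegal, List.contains_cons, List.contains_nil, Bool.or_false, Bool.not_or]
  ac_rfl

-- A's while-loop is rstrip('.')
lemma stripA_toList (s : String) :
    (stripTrailingDotsA s).toList = (s.toList.reverse.dropWhile (fun c => ['.'].contains c)).reverse := by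
  fun_induction stripTrailingDotsA s with
  | case1 s h ih =>
    rw [PySem.Str.slice_to_neg_one] at ih
    rw [ih]
    rw [PySem.Str.endswith_eq, PySem.Chars.endswith_iff] at h
    obtain ⟨ys, hys⟩ := h
    rw [← hys]
    simp
  | case2 s h =>
    rw [PySem.Str.endswith_eq] at h
    cases hrev : s.toList.reverse with
    | nil => simp_all
    | cons x t =>
      have hs : s.toList = t.reverse ++ [x] := by
        simpa using congrArg List.reverse hrev
      have hx : x ≠ '.' := by
        intro hx; subst hx
        apply h
        rw [PySem.Chars.endswith_iff]
        exact ⟨t.reverse, by simp [hs]⟩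
      rw [List.dropWhile_cons_of_neg (by simp [hx])]
      simpa using hs

-- ===== VERDICT (by name: the statement is the Claim_ definition above) =====
theorem validPathName_spec : Claim_equal_validPathName := by
  intro name _
  unfold Spec_validPathName validPathName validPathName_alt
  apply String.toList_inj.mp
  rw [stripA_toList]
  simp only [PySem.Str.toList_replace]
  simp only [show ("[" : String).toList = ['['] from rfl,
    show (":" : String).toList = [':'] from rfl,
    show ("*" : String).toList = ['*'] from rfl,
    show ("?" : String).toList = ['?'] from rfl,
    show ("\"" : String).toList = ['"'] from rfl,
    show ("<" : String).toList = ['<'] from rfl,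
    show (">" : String).toList = ['>'] from rfl,
    show ("|" : String).toList = ['|'] from rfl,
    show ("]" : String).toList = [']'] from rfl,
    show ("" : String).toList = [] from rfl]
  rw [replace_single, replace_single, replace_single, replace_single, replace_single,
    replace_single, replace_single, replace_single, replace_single, nine_filters]
  simp [String.toList_ofList]
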